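-- pv_equiv track=rewrite | github.com/herolava259/Coding-Interview-Practice | HackerRankWithAlgorithm/DynamicProgramming/CandleCouting.py | sol2_count_increase_arr
-- ===== SOURCE A (Python) =====
-- def sol2_count_increase_arr(arr):
--     n = len(arr)
--     greater_or_equal_elems = [i for i in range(n)]
--     less_elems = [i for i in range(n)]
--
--     for i in range(1, n):
--         if arr[i] > arr[i-1]:
--             less_elems[i] = i-1
--             idx = greater_or_equal_elems[i-1]
--             while idx != greater_or_equal_elems[idx] and arr[idx] < arr[i]:
--                 idx = greater_or_equal_elems[idx]
--
--             if arr[idx] >= arr[i]: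
--                 greater_or_equal_elems[i] = idx
--         else:
--             greater_or_equal_elems[i] = i-1
--             idx = less_elems[i-1]
--
--             while idx != less_elems[idx] and arr[idx] >= arr[i]:
--                 idx = less_elems[idx]
--
--             if arr[idx] < arr[i]:
--                 less_elems[i] = idx
--     dp = [0 for _ in range(n)]
--     dp[0] = 1
--     for i in range(1,n):
--         idx = less_elems[i]
--
--         while arr[idx] < arr[i]:
--             dp[i] += dp[idx]
--             prev_ge = greater_or_equal_elems[idx]
--             if prev_ge == idx:
--                 dp[i] += dp[idx] - 1
--                 break
--             for j in range(prev_ge+1, idx):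
--                 dp[i] += dp[j]
--             idx = prev_ge
--         dp[i] += 1
--
--     return dp[-1] - 1
-- ===== SOURCE B (Python) =====
-- def sol2_count_increase_arr(arr):
--     n = len(arr)
--     dp = [0] * n
--     dp[0] = 1
--     pref = [0, 1]  # pref[k] = dp[0] + ... + dp[k-1]
--     for i in range(1, n):
--         l = i - 1
--         while l >= 0 and arr[l] >= arr[i]:
--             l -= 1
--         if l < 0:
--             dp[i] = 1
--         else:
--             g = l - 1
--             while g >= 0 and arr[g] < arr[i]:
--                 g -= 1
--             dp[i] = 1 + pref[l + 1] - pref[g + 1]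
--         pref.append(pref[-1] + dp[i])
--     return dp[-1] - 1
-- ===== Notes on version B (the rewrite author's own statement) =====
-- stated objective: simpler
-- what changed: Replaces A's two-phase jump-pointer construction (previous-smaller / previous-greater-or-equal chains with chain-chasing inner while loops and a telescoping sum trick) by one pass that finds the two boundary indices by direct backward scans and reads the contiguous dp-range sum off a maintained prefix-sum array in O(1).
-- outside the precondition, e.g. on sol2_count_increase_arr([]): A raises IndexError, B raises IndexError
import Mathlib
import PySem

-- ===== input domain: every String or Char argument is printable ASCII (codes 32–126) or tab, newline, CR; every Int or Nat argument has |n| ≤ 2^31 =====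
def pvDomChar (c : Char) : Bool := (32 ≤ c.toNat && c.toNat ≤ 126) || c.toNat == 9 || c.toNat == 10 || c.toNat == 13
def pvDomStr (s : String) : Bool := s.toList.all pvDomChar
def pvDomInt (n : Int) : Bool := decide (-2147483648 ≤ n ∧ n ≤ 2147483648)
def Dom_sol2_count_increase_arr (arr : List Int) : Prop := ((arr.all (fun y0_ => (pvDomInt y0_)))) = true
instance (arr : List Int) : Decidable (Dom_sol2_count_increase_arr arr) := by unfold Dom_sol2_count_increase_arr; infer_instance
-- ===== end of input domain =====

-- B replaces A's two-phase jump-pointer construction by direct backward scans for the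
-- two boundary indices plus a maintained prefix-sum list giving the dp-range sum in O(1).

-- ===== PORT A =====
-- while idx != ge[idx] and arr[idx] < v: idx = ge[idx]   (fuel = n, always sufficient)
def pvA_chaseGE (arr : List Int) (ge : List Nat) (v : Int) : Nat → Nat → Nat
  | 0, idx => idx
  | fuel+1, idx =>
    if ge.getD idx idx ≠ idx ∧ arr.getD idx 0 < v then
      pvA_chaseGE arr ge v fuel (ge.getD idx idx)
    else idx

-- while idx != le[idx] and arr[idx] >= v: idx = le[idx]
def pvA_chaseLT (arr : List Int) (le : List Nat) (v : Int) : Nat → Nat → Nat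
  | 0, idx => idx
  | fuel+1, idx =>
    if le.getD idx idx ≠ idx ∧ arr.getD idx 0 ≥ v then
      pvA_chaseLT arr le v fuel (le.getD idx idx)
    else idx

-- one iteration of A's first loop (builds ge = prev greater-or-equal, le = prev smaller)
def pvA_step1 (arr : List Int) (n : Nat) (st : List Nat × List Nat) (i : Nat) : List Nat × List Nat :=
  let ge := st.1
  let le := st.2
  if arr.getD i 0 > arr.getD (i-1) 0 then
    let le' := le.set i (i-1)
    let idx := pvA_chaseGE arr ge (arr.getD i 0) n (ge.getD (i-1) (i-1))
    let ge' := if arr.getD idx 0 ≥ arr.getD i 0 then ge.set i idx else ge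
    (ge', le')
  else
    let ge' := ge.set i (i-1)
    let idx := pvA_chaseLT arr le (arr.getD i 0) n (le.getD (i-1) (i-1))
    let le' := if arr.getD idx 0 < arr.getD i 0 then le.set i idx else le
    (ge', le')

-- for j in range(a, b): acc += dp[j]
def pvA_sumRange (dp : List Int) (a b : Nat) : Int :=
  (List.range' a (b - a)).foldl (fun s j => s + dp.getD j 0) 0

-- the inner while of A's dp loop (fuel = n)
def pvA_chaseSum (arr : List Int) (ge : List Nat) (dp : List Int) (v : Int) : Nat → Nat → Int → Int
  | 0, _, acc => acc
  | fuel+1, idx, acc =>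
    if arr.getD idx 0 < v then
      let acc1 := acc + dp.getD idx 0
      let pg := ge.getD idx idx
      if pg = idx then acc1 + (dp.getD idx 0 - 1)
      else pvA_chaseSum arr ge dp v fuel pg (acc1 + pvA_sumRange dp (pg+1) idx)
    else acc

def pvA_step2 (arr : List Int) (ge le : List Nat) (n : Nat) (dp : List Int) (i : Nat) : List Int :=
  dp.set i (pvA_chaseSum arr ge dp (arr.getD i 0) n (le.getD i i) 0 + 1)

def sol2_count_increase_arr (arr : List Int) : Int :=
  let n := arr.length
  let st := (List.range' 1 (n-1)).foldl (pvA_step1 arr n) (List.range n, List.range n)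
  let dp0 := (List.replicate n (0:Int)).set 0 1
  let dp := (List.range' 1 (n-1)).foldl (pvA_step2 arr st.1 st.2 n) dp0
  (PySem.List.pyGet? dp (-1)).getD 0 - 1

-- ===== PORT B =====
-- l = i-1; while l >= 0 and arr[l] >= v: l -= 1   (argument = l+1; none = reached -1)
def pvB_findL (arr : List Int) (v : Int) : Nat → Option Nat
  | 0 => none
  | l+1 => if arr.getD l 0 ≥ v then pvB_findL arr v l else some l

-- g = l-1; while g >= 0 and arr[g] < v: g -= 1
def pvB_findG (arr : List Int) (v : Int) : Nat → Option Nat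
  | 0 => none
  | g+1 => if arr.getD g 0 < v then pvB_findG arr v g else some g

def pvB_step (arr : List Int) (st : List Int × List Int) (i : Nat) : List Int × List Int :=
  let dp := st.1
  let pref := st.2
  let v := arr.getD i 0
  let di : Int :=
    match pvB_findL arr v i with
    | none => 1
    | some l =>
      let gp1 : Nat := match pvB_findG arr v l with | none => 0 | some g => g+1
      1 + pref.getD (l+1) 0 - pref.getD gp1 0
  (dp.set i di, pref ++ [pref.getD (pref.length - 1) 0 + di])

def sol2_count_increase_arr_alt (arr : List Int) : Int :=
  let n := arr.length
  let dp0 := (List.replicate n (0:Int)).set 0 1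
  let st := (List.range' 1 (n-1)).foldl (pvB_step arr) (dp0, [0, 1])
  (PySem.List.pyGet? st.1 (-1)).getD 0 - 1

-- ===== PRECONDITION & SPEC =====
-- Pre_ excludes only the empty list, on which A raises IndexError (dp[0] = 1).
def Pre_sol2_count_increase_arr (arr : List Int) : Prop := arr ≠ []
instance (arr : List Int) : Decidable (Pre_sol2_count_increase_arr arr) := by unfold Pre_sol2_count_increase_arr; infer_instance
def pvWitness_sol2_count_increase_arr : List Int := [1, 2, 3]

def Spec_sol2_count_increase_arr (arr : List Int) (out : Int) : Prop := out = sol2_count_increase_arr_alt arr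
instance (arr : List Int) (out : Int) : Decidable (Spec_sol2_count_increase_arr arr out) := by unfold Spec_sol2_count_increase_arr; infer_instance

-- ===== CLAIM (what is proved, stated in full; the proofs are below) =====
def Claim_equal_sol2_count_increase_arr : Prop := ∀ (arr : List Int), Dom_sol2_count_increase_arr arr → Pre_sol2_count_increase_arr arr → Spec_sol2_count_increase_arr arr (sol2_count_increase_arr arr)

-- ===== LEMMAS AND PROOFS =====

-- the common spec: dp values built left to right
def dSpec (arr : List Int) : Nat → List Int
  | 0 => []
  | m+1 =>
    let d := dSpec arr m
    d ++ [match pvB_findL arr (arr.getD m 0) m with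
          | none => 1
          | some l =>
            let gp1 : Nat := match pvB_findG arr (arr.getD m 0) l with | none => 0 | some g => g+1
            1 + pvA_sumRange d gp1 (l+1)]

def dV (arr : List Int) (j : Nat) : Int := (dSpec arr (j+1)).getD j 0

def dSum (arr : List Int) (a b : Nat) : Int := ∑ j ∈ Finset.Ico a b, dV arr j

theorem dSpec_length (arr : List Int) (m : Nat) : (dSpec arr m).length = m := by
  induction m with
  | zero => rfl
  | succ m ih => simp [dSpec, ih]

theorem dSpec_getD (arr : List Int) (m j : Nat) (h : j < m) :
    (dSpec arr m).getD j 0 = dV arr j := by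
  induction m with
  | zero => omega
  | succ m ih =>
    rcases Nat.lt_succ_iff_lt_or_eq.mp h with h' | h'
    · rw [show (dSpec arr (m+1)) = dSpec arr m ++ [_] from rfl,
        List.getD_append _ _ _ _ (by rw [dSpec_length]; omega)]
      exact ih h'
    · subst h'; rfl

theorem foldl_add_getD (dp : List Int) (l : List Nat) (s : Int) :
    l.foldl (fun s j => s + dp.getD j 0) s = s + (l.map (fun j => dp.getD j 0)).sum := by
  induction l generalizing s with
  | nil => simp
  | cons a l ih => rw [List.foldl_cons, ih, List.map_cons, List.sum_cons, add_assoc]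

theorem sum_map_range' (f : Nat → Int) (k : Nat) : ∀ a,
    ((List.range' a k).map f).sum = ∑ j ∈ Finset.Ico a (a + k), f j := by
  induction k with
  | zero => intro a; simp
  | succ k ih =>
    intro a
    have e : a + (k+1) = a+1+k := by omega
    rw [List.range'_succ, List.map_cons, List.sum_cons, ih (a+1),
      Finset.sum_eq_sum_Ico_succ_bot (by omega : a < a + (k+1)) f, e]

theorem sumRange_eq (dp : List Int) (a b : Nat) :
    pvA_sumRange dp a b = ∑ j ∈ Finset.Ico a b, dp.getD j 0 := by
  unfold pvA_sumRange
  rw [foldl_add_getD, zero_add, sum_map_range']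
  by_cases h : a ≤ b
  · congr 1; congr 1; omega
  · rw [show a + (b - a) = a from by omega]
    rw [Finset.Ico_self, Finset.Ico_eq_empty (by omega)]

theorem sumRange_congr (dp : List Int) (arr : List Int) (a b : Nat)
    (h : ∀ j, a ≤ j → j < b → dp.getD j 0 = dV arr j) :
    pvA_sumRange dp a b = dSum arr a b := by
  rw [sumRange_eq, dSum]
  exact Finset.sum_congr rfl (fun j hj => by
    rw [Finset.mem_Ico] at hj; exact h j hj.1 hj.2)

-- characterisations of the scans
theorem findG_none (arr : List Int) (v : Int) (k : Nat) :
    pvB_findG arr v k = none ↔ ∀ j, j < k → arr.getD j 0 < v := by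
  induction k with
  | zero => simp [pvB_findG]
  | succ k ih =>
    by_cases h : arr.getD k 0 < v
    · simp only [pvB_findG, if_pos h, ih]
      constructor
      · intro H j hj
        rcases Nat.lt_succ_iff_lt_or_eq.mp hj with h' | h'
        · exact H j h'
        · subst h'; exact h
      · intro H j hj; exact H j (by omega)
    · simp only [pvB_findG, if_neg h]
      constructor
      · intro H; cases H
      · intro H; exact absurd (H k (by omega)) h

theorem findG_some (arr : List Int) (v : Int) (k g : Nat) :
    pvB_findG arr v k = some g ↔
      g < k ∧ ¬ arr.getD g 0 < v ∧ ∀ j, g < j → j < k → arr.getD j 0 < v := by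
  induction k with
  | zero => simp [pvB_findG]
  | succ k ih =>
    by_cases h : arr.getD k 0 < v
    · simp only [pvB_findG, if_pos h, ih]
      constructor
      · rintro ⟨h1, h2, h3⟩
        refine ⟨by omega, h2, fun j hj1 hj2 => ?_⟩
        rcases Nat.lt_succ_iff_lt_or_eq.mp hj2 with h' | h'
        · exact h3 j hj1 h'
        · subst h'; exact h
      · rintro ⟨h1, h2, h3⟩
        have : g ≠ k := by rintro rfl; exact h2 h
        exact ⟨by omega, h2, fun j hj1 hj2 => h3 j hj1 (by omega)⟩
    · simp only [pvB_findG, if_neg h, Option.some_inj]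
      constructor
      · rintro rfl; exact ⟨by omega, h, fun j hj1 hj2 => by omega⟩
      · rintro ⟨h1, h2, h3⟩
        have : g = k := by
          by_contra hne
          exact absurd (h3 k (by omega) (by omega)) h
        rw [this]
theorem findG_skip (arr : List Int) (v : Int) (a b : Nat)
    (hab : a ≤ b) (h : ∀ j, a ≤ j → j < b → arr.getD j 0 < v) :
    pvB_findG arr v b = pvB_findG arr v a := by
  induction b with
  | zero => cases Nat.le_zero.mp hab; rfl
  | succ b ih =>
    rcases Nat.lt_succ_iff_lt_or_eq.mp (Nat.lt_succ_of_le hab) with h' | h'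
    · rw [pvB_findG, if_pos (h b (by omega) (by omega))]
      exact ih (by omega) (fun j hj1 hj2 => h j hj1 (by omega))
    · subst h'; rfl

theorem findL_skip (arr : List Int) (v : Int) (a b : Nat)
    (hab : a ≤ b) (h : ∀ j, a ≤ j → j < b → arr.getD j 0 ≥ v) :
    pvB_findL arr v b = pvB_findL arr v a := by
  induction b with
  | zero => cases Nat.le_zero.mp hab; rfl
  | succ b ih =>
    rcases Nat.lt_succ_iff_lt_or_eq.mp (Nat.lt_succ_of_le hab) with h' | h'
    · rw [pvB_findL, if_pos (h b (by omega) (by omega))]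
      exact ih (by omega) (fun j hj1 hj2 => h j hj1 (by omega))
    · subst h'; rfl

theorem findL_none (arr : List Int) (v : Int) (k : Nat) :
    pvB_findL arr v k = none ↔ ∀ j, j < k → arr.getD j 0 ≥ v := by
  induction k with
  | zero => simp [pvB_findL]
  | succ k ih =>
    by_cases h : arr.getD k 0 ≥ v
    · simp only [pvB_findL, if_pos h, ih]
      constructor
      · intro H j hj
        rcases Nat.lt_succ_iff_lt_or_eq.mp hj with h' | h'
        · exact H j h'
        · subst h'; exact h
      · intro H j hj; exact H j (by omega)
    · simp only [pvB_findL, if_neg h]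
      constructor
      · intro H; cases H
      · intro H; exact absurd (H k (by omega)) h

theorem findL_some (arr : List Int) (v : Int) (k l : Nat) :
    pvB_findL arr v k = some l ↔
      l < k ∧ ¬ arr.getD l 0 ≥ v ∧ ∀ j, l < j → j < k → arr.getD j 0 ≥ v := by
  induction k with
  | zero => simp [pvB_findL]
  | succ k ih =>
    by_cases h : arr.getD k 0 ≥ v
    · simp only [pvB_findL, if_pos h, ih]
      constructor
      · rintro ⟨h1, h2, h3⟩
        refine ⟨by omega, h2, fun j hj1 hj2 => ?_⟩
        rcases Nat.lt_succ_iff_lt_or_eq.mp hj2 with h' | h'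
        · exact h3 j hj1 h'
        · subst h'; exact h
      · rintro ⟨h1, h2, h3⟩
        have : l ≠ k := by rintro rfl; exact h2 h
        exact ⟨by omega, h2, fun j hj1 hj2 => h3 j hj1 (by omega)⟩
    · simp only [pvB_findL, if_neg h, Option.some_inj]
      constructor
      · rintro rfl; exact ⟨by omega, h, fun j hj1 hj2 => by omega⟩
      · rintro ⟨h1, h2, h3⟩
        have : l = k := by
          by_contra hne
          exact absurd (h3 k (by omega) (by omega)) h
        rw [this]

-- nearest previous greater-or-equal / smaller, as Options
def GEi (arr : List Int) (i : Nat) : Option Nat := pvB_findG arr (arr.getD i 0) i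
def LTi (arr : List Int) (i : Nat) : Option Nat := pvB_findL arr (arr.getD i 0) i

theorem chaseGE_spec (arr : List Int) (ge : List Nat) (v : Int) (m : Nat)
    (hOK : ∀ k, k < m → ge.getD k k = (GEi arr k).getD k) :
    ∀ fuel idx, idx < m → idx < fuel →
      (arr.getD (pvA_chaseGE arr ge v fuel idx) 0 ≥ v →
        pvB_findG arr v (idx+1) = some (pvA_chaseGE arr ge v fuel idx)) ∧
      (arr.getD (pvA_chaseGE arr ge v fuel idx) 0 < v →
        pvB_findG arr v (idx+1) = none) := by
  intro fuel
  induction fuel with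
  | zero => intro idx h1 h2; omega
  | succ fuel ih =>
    intro idx hm hf
    have hok := hOK idx hm
    cases hE : GEi arr idx with
    | none =>
      have hid : ge.getD idx idx = idx := by rw [hok, hE]; rfl
      have hres : pvA_chaseGE arr ge v (fuel+1) idx = idx := by
        unfold pvA_chaseGE
        rw [if_neg (fun hc => hc.1 hid)]
      rw [hres]
      have hall := (findG_none arr (arr.getD idx 0) idx).mp hE
      constructor
      · intro hv
        rw [pvB_findG, if_neg (by omega)]
      · intro hv
        refine (findG_none arr v (idx+1)).mpr (fun j hj => ?_)
        rcases Nat.lt_succ_iff_lt_or_eq.mp hj with h' | h'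
        · exact lt_trans (hall j h') hv
        · subst h'; exact hv
    | some p =>
      obtain ⟨hp1, hp2, hp3⟩ := (findG_some arr (arr.getD idx 0) idx p).mp hE
      have hgd : ge.getD idx idx = p := by rw [hok, hE]; rfl
      by_cases hv : arr.getD idx 0 < v
      · have hres : pvA_chaseGE arr ge v (fuel+1) idx = pvA_chaseGE arr ge v fuel p := by
          conv_lhs => rw [pvA_chaseGE]
          rw [if_pos ⟨by rw [hgd]; omega, hv⟩, hgd]
        have hskip : pvB_findG arr v (idx+1) = pvB_findG arr v (p+1) := by
          refine findG_skip arr v (p+1) (idx+1) (by omega) (fun j hj1 hj2 => ?_)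
          rcases Nat.lt_succ_iff_lt_or_eq.mp hj2 with h' | h'
          · exact lt_trans (hp3 j (by omega) h') hv
          · subst h'; exact hv
        rw [hres, hskip]
        exact ih p (by omega) (by omega)
      · have hres : pvA_chaseGE arr ge v (fuel+1) idx = idx := by
          unfold pvA_chaseGE
          rw [if_neg (by rintro ⟨-, h⟩; exact hv h)]
        rw [hres]
        exact ⟨fun _ => by rw [pvB_findG, if_neg hv], fun h => absurd h hv⟩

theorem chaseLT_spec (arr : List Int) (le : List Nat) (v : Int) (m : Nat)
    (hOK : ∀ k, k < m → le.getD k k = (LTi arr k).getD k) :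
    ∀ fuel idx, idx < m → idx < fuel →
      (arr.getD (pvA_chaseLT arr le v fuel idx) 0 < v →
        pvB_findL arr v (idx+1) = some (pvA_chaseLT arr le v fuel idx)) ∧
      (arr.getD (pvA_chaseLT arr le v fuel idx) 0 ≥ v →
        pvB_findL arr v (idx+1) = none) := by
  intro fuel
  induction fuel with
  | zero => intro idx h1 h2; omega
  | succ fuel ih =>
    intro idx hm hf
    have hok := hOK idx hm
    cases hE : LTi arr idx with
    | none =>
      have hid : le.getD idx idx = idx := by rw [hok, hE]; rfl
      have hres : pvA_chaseLT arr le v (fuel+1) idx = idx := by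
        unfold pvA_chaseLT
        rw [if_neg (fun hc => hc.1 hid)]
      rw [hres]
      have hall := (findL_none arr (arr.getD idx 0) idx).mp hE
      constructor
      · intro hv
        rw [pvB_findL, if_neg (by omega)]
      · intro hv
        refine (findL_none arr v (idx+1)).mpr (fun j hj => ?_)
        rcases Nat.lt_succ_iff_lt_or_eq.mp hj with h' | h'
        · exact le_trans hv (hall j h')
        · subst h'; exact hv
    | some p =>
      obtain ⟨hp1, hp2, hp3⟩ := (findL_some arr (arr.getD idx 0) idx p).mp hE
      have hgd : le.getD idx idx = p := by rw [hok, hE]; rfl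
      by_cases hv : arr.getD idx 0 ≥ v
      · have hres : pvA_chaseLT arr le v (fuel+1) idx = pvA_chaseLT arr le v fuel p := by
          conv_lhs => rw [pvA_chaseLT]
          rw [if_pos ⟨by rw [hgd]; omega, hv⟩, hgd]
        have hskip : pvB_findL arr v (idx+1) = pvB_findL arr v (p+1) := by
          refine findL_skip arr v (p+1) (idx+1) (by omega) (fun j hj1 hj2 => ?_)
          rcases Nat.lt_succ_iff_lt_or_eq.mp hj2 with h' | h'
          · exact le_trans hv (hp3 j (by omega) h')
          · subst h'; exact hv
        rw [hres, hskip]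
        exact ih p (by omega) (by omega)
      · have hres : pvA_chaseLT arr le v (fuel+1) idx = idx := by
          unfold pvA_chaseLT
          rw [if_neg (by rintro ⟨-, h⟩; exact hv h)]
        rw [hres]
        exact ⟨fun _ => by rw [pvB_findL, if_neg (by omega)], fun h => absurd h hv⟩

theorem pv_getD_set_ne {α : Type} (l : List α) (x d : α) (i k : Nat) (h : i ≠ k) :
    (l.set i x).getD k d = l.getD k d := by
  simp [List.getD_eq_getElem?_getD, List.getElem?_set_ne h]

theorem pv_getD_set_self {α : Type} (l : List α) (x d : α) (i : Nat) (h : i < l.length) :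
    (l.set i x).getD i d = x := by
  simp [List.getD_eq_getElem?_getD, List.getElem?_set_self h]

theorem pv_getD_range (n k : Nat) : (List.range n).getD k k = k := by
  by_cases h : k < n
  · simp [List.getD_eq_getElem?_getD, h]
  · exact List.getD_eq_default _ _ (by rw [List.length_range]; omega)

def geleInv (arr : List Int) (n m : Nat) (ge le : List Nat) : Prop :=
  ge.length = n ∧ le.length = n ∧
  (∀ k, k < m → ge.getD k k = (GEi arr k).getD k ∧ le.getD k k = (LTi arr k).getD k) ∧
  (∀ k, m ≤ k → ge.getD k k = k ∧ le.getD k k = k)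

theorem step1_inv (arr : List Int) (n i : Nat) (ge le : List Nat)
    (hn : n = arr.length) (hi1 : 1 ≤ i) (hin : i < n)
    (hInv : geleInv arr n i ge le) :
    geleInv arr n (i+1) (pvA_step1 arr n (ge, le) i).1 (pvA_step1 arr n (ge, le) i).2 := by
  obtain ⟨hgl, hll, hlt, hge_id⟩ := hInv
  have hOKge : ∀ k, k < i → ge.getD k k = (GEi arr k).getD k := fun k hk => (hlt k hk).1
  have hOKle : ∀ k, k < i → le.getD k k = (LTi arr k).getD k := fun k hk => (hlt k hk).2
  have him1 : i - 1 < i := by omega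
  by_cases hb : arr.getD i 0 > arr.getD (i-1) 0
  · -- increasing step: set le[i] := i-1, chase ge chain
    have hidx0 : ge.getD (i-1) (i-1) = (GEi arr (i-1)).getD (i-1) := hOKge _ him1
    have hidx0lt : ge.getD (i-1) (i-1) < i := by
      rw [hidx0]
      cases hE : GEi arr (i-1) with
      | none => simpa using him1
      | some p =>
        have := ((findG_some arr (arr.getD (i-1) 0) (i-1) p).mp hE).1
        simp only [Option.getD_some]
        omega
    have hchase := chaseGE_spec arr ge (arr.getD i 0) i hOKge n (ge.getD (i-1) (i-1))
      hidx0lt (by omega)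
    have hskip : pvB_findG arr (arr.getD i 0) i = pvB_findG arr (arr.getD i 0) (ge.getD (i-1) (i-1) + 1) := by
      cases hE : GEi arr (i-1) with
      | none =>
        rw [hidx0, hE]
        simp only [Option.getD_none]
        congr 1
        omega
      | some p =>
        obtain ⟨hp1, hp2, hp3⟩ := (findG_some arr (arr.getD (i-1) 0) (i-1) p).mp hE
        rw [hidx0, hE]
        simp only [Option.getD_some]
        refine findG_skip arr (arr.getD i 0) (p+1) i (by omega) (fun j hj1 hj2 => ?_)
        rcases (by omega : j < i - 1 ∨ j = i - 1) with h' | h'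
        · exact lt_trans (hp3 j (by omega) h') hb
        · subst h'; exact hb
    have hLTi : LTi arr i = some (i-1) := by
      refine (findL_some arr (arr.getD i 0) i (i-1)).mpr ⟨by omega, by omega, fun j hj1 hj2 => by omega⟩
    have hstep : pvA_step1 arr n (ge, le) i =
        (if arr.getD (pvA_chaseGE arr ge (arr.getD i 0) n (ge.getD (i-1) (i-1))) 0 ≥ arr.getD i 0
           then ge.set i (pvA_chaseGE arr ge (arr.getD i 0) n (ge.getD (i-1) (i-1))) else ge,
         le.set i (i-1)) := by
      unfold pvA_step1
      rw [if_pos hb]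
    rw [hstep]
    refine ⟨by split_ifs <;> simp [hgl], by simp [hll], ?_, ?_⟩
    · intro k hk
      rcases (by omega : k < i ∨ k = i) with h' | h'
      · constructor
        · split_ifs with hr
          · rw [pv_getD_set_ne _ _ _ _ _ (by omega)]; exact hOKge k h'
          · exact hOKge k h'
        · rw [pv_getD_set_ne _ _ _ _ _ (by omega)]; exact hOKle k h'
      · rw [h']
        constructor
        · split_ifs with hr
          · rw [pv_getD_set_self _ _ _ _ (by omega)]
            have := hchase.1 hr
            unfold GEi
            rw [hskip, this]
            rfl
          · have hnone : pvB_findG arr (arr.getD i 0) i = none := by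
              rw [hskip]; exact hchase.2 (by omega)
            unfold GEi
            rw [hnone]
            exact (hge_id i (by omega)).1
        · rw [pv_getD_set_self _ _ _ _ (by omega), hLTi]
          rfl
    · intro k hk
      constructor
      · split_ifs with hr
        · rw [pv_getD_set_ne _ _ _ _ _ (by omega)]; exact (hge_id k (by omega)).1
        · exact (hge_id k (by omega)).1
      · rw [pv_getD_set_ne _ _ _ _ _ (by omega)]; exact (hge_id k (by omega)).2
  · -- non-increasing step: set ge[i] := i-1, chase le chain
    have hb' : arr.getD (i-1) 0 ≥ arr.getD i 0 := by omega
    have hidx0 : le.getD (i-1) (i-1) = (LTi arr (i-1)).getD (i-1) := hOKle _ him1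
    have hidx0lt : le.getD (i-1) (i-1) < i := by
      rw [hidx0]
      cases hE : LTi arr (i-1) with
      | none => simpa using him1
      | some p =>
        have := ((findL_some arr (arr.getD (i-1) 0) (i-1) p).mp hE).1
        simp only [Option.getD_some]
        omega
    have hchase := chaseLT_spec arr le (arr.getD i 0) i hOKle n (le.getD (i-1) (i-1))
      hidx0lt (by omega)
    have hskip : pvB_findL arr (arr.getD i 0) i = pvB_findL arr (arr.getD i 0) (le.getD (i-1) (i-1) + 1) := by
      cases hE : LTi arr (i-1) with
      | none =>
        rw [hidx0, hE]
        simp only [Option.getD_none]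
        congr 1
        omega
      | some p =>
        obtain ⟨hp1, hp2, hp3⟩ := (findL_some arr (arr.getD (i-1) 0) (i-1) p).mp hE
        rw [hidx0, hE]
        simp only [Option.getD_some]
        refine findL_skip arr (arr.getD i 0) (p+1) i (by omega) (fun j hj1 hj2 => ?_)
        rcases (by omega : j < i - 1 ∨ j = i - 1) with h' | h'
        · exact le_trans hb' (hp3 j (by omega) h')
        · subst h'; exact hb'
    have hGEi : GEi arr i = some (i-1) := by
      refine (findG_some arr (arr.getD i 0) i (i-1)).mpr ⟨by omega, by omega, fun j hj1 hj2 => by omega⟩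
    have hstep : pvA_step1 arr n (ge, le) i =
        (ge.set i (i-1),
         if arr.getD (pvA_chaseLT arr le (arr.getD i 0) n (le.getD (i-1) (i-1))) 0 < arr.getD i 0
           then le.set i (pvA_chaseLT arr le (arr.getD i 0) n (le.getD (i-1) (i-1))) else le) := by
      unfold pvA_step1
      rw [if_neg hb]
    rw [hstep]
    refine ⟨by simp [hgl], by split_ifs <;> simp [hll], ?_, ?_⟩
    · intro k hk
      rcases (by omega : k < i ∨ k = i) with h' | h'
      · constructor
        · rw [pv_getD_set_ne _ _ _ _ _ (by omega)]; exact hOKge k h'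
        · split_ifs with hr
          · rw [pv_getD_set_ne _ _ _ _ _ (by omega)]; exact hOKle k h'
          · exact hOKle k h'
      · rw [h']
        constructor
        · rw [pv_getD_set_self _ _ _ _ (by omega), hGEi]
          rfl
        · split_ifs with hr
          · rw [pv_getD_set_self _ _ _ _ (by omega)]
            have := hchase.1 hr
            unfold LTi
            rw [hskip, this]
            rfl
          · have hnone : pvB_findL arr (arr.getD i 0) i = none := by
              rw [hskip]; exact hchase.2 (by omega)
            unfold LTi
            rw [hnone]
            exact (hge_id i (by omega)).2
    · intro k hk
      constructor
      · rw [pv_getD_set_ne _ _ _ _ _ (by omega)]; exact (hge_id k (by omega)).1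
      · split_ifs with hr
        · rw [pv_getD_set_ne _ _ _ _ _ (by omega)]; exact (hge_id k (by omega)).2
        · exact (hge_id k (by omega)).2

theorem loop1_fold (arr : List Int) (n : Nat) (hn : n = arr.length) :
    ∀ t, t + 1 ≤ n →
      geleInv arr n (t+1)
        ((List.range' 1 t).foldl (pvA_step1 arr n) (List.range n, List.range n)).1
        ((List.range' 1 t).foldl (pvA_step1 arr n) (List.range n, List.range n)).2 := by
  intro t
  induction t with
  | zero =>
    intro h
    rw [show List.range' 1 0 = ([] : List Nat) from rfl, List.foldl_nil]
    refine ⟨by simp, by simp, ?_, ?_⟩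
    · intro k hk
      have hk0 : k = 0 := by omega
      subst hk0
      constructor
      · rw [pv_getD_range]; rfl
      · rw [pv_getD_range]; rfl
    · intro k hk
      exact ⟨pv_getD_range n k, pv_getD_range n k⟩
  | succ t ih =>
    intro h
    rw [List.range'_concat, List.foldl_append, List.foldl_cons, List.foldl_nil,
      show 1 + 1 * t = t + 1 from by omega]
    exact step1_inv arr n (t+1) _ _ hn (by omega) (by omega) (ih (by omega))

theorem pv_getD_append_lt {α : Type} (l l' : List α) (k : Nat) (d : α) (h : k < l.length) :
    (l ++ l').getD k d = l.getD k d := by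
  simp [List.getD_eq_getElem?_getD, List.getElem?_append_left h]

theorem pv_getD_append_length {α : Type} (l : List α) (x d : α) :
    (l ++ [x]).getD l.length d = x := by
  simp [List.getD_eq_getElem?_getD]

-- the dp recurrence, read off the spec list
theorem dV_eq (arr : List Int) (m : Nat) :
    dV arr m = (match pvB_findL arr (arr.getD m 0) m with
      | none => (1 : Int)
      | some l =>
        1 + dSum arr (match pvB_findG arr (arr.getD m 0) l with | none => 0 | some g => g+1) (l+1)) := by
  unfold dV
  have hd : dSpec arr (m+1) = dSpec arr m ++
      [match pvB_findL arr (arr.getD m 0) m with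
       | none => (1 : Int)
       | some l =>
         1 + pvA_sumRange (dSpec arr m)
           (match pvB_findG arr (arr.getD m 0) l with | none => 0 | some g => g+1) (l+1)] := rfl
  rw [hd]
  set dd := dSpec arr m with hdd
  have hlen : dd.length = m := dSpec_length arr m
  rw [← hlen, pv_getD_append_length, hlen]
  cases hL : pvB_findL arr (arr.getD m 0) m with
  | none => rfl
  | some l =>
    obtain ⟨hl1, hl2, hl3⟩ := (findL_some arr (arr.getD m 0) m l).mp hL
    simp only
    rw [sumRange_congr (dSpec arr m) arr _ _ (fun j hj1 hj2 => dSpec_getD arr m j (by omega))]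

theorem dV_min (arr : List Int) (m : Nat) (h : GEi arr m = none) :
    dV arr m = 1 + dSum arr 0 m := by
  have hall := (findG_none arr (arr.getD m 0) m).mp h
  cases m with
  | zero =>
    rw [dV_eq]
    simp [dSum, pvB_findL]
  | succ m =>
    have hL : pvB_findL arr (arr.getD (m+1) 0) (m+1) = some m := by
      refine (findL_some arr (arr.getD (m+1) 0) (m+1) m).mpr
        ⟨by omega, by have := hall m (by omega); omega, fun j hj1 hj2 => by omega⟩
    have hG : pvB_findG arr (arr.getD (m+1) 0) m = none := by
      refine (findG_none arr (arr.getD (m+1) 0) m).mpr (fun j hj => hall j (by omega))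
    rw [dV_eq, hL]
    simp only [hG]
    norm_num

theorem chaseSum_spec (arr : List Int) (ge : List Nat) (dp : List Int) (v : Int) (i : Nat)
    (hge : ∀ k, k < i → ge.getD k k = (GEi arr k).getD k)
    (hdp : ∀ k, k < i → dp.getD k 0 = dV arr k) :
    ∀ fuel idx acc, idx < i → idx < fuel → arr.getD idx 0 < v →
      pvA_chaseSum arr ge dp v fuel idx acc =
        acc + dSum arr (match pvB_findG arr v (idx+1) with | none => 0 | some g => g+1) (idx+1) := by
  intro fuel
  induction fuel with
  | zero => intro idx acc h1 h2; omega
  | succ fuel ih =>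
    intro idx acc hi hf hv
    conv_lhs => rw [pvA_chaseSum]
    rw [if_pos hv]
    have hok := hge idx hi
    have hdpi := hdp idx hi
    cases hE : GEi arr idx with
    | none =>
      have hpg : ge.getD idx idx = idx := by rw [hok, hE]; rfl
      rw [hpg, if_pos rfl]
      have hNone : pvB_findG arr v (idx+1) = none := by
        refine (findG_none arr v (idx+1)).mpr (fun j hj => ?_)
        rcases Nat.lt_succ_iff_lt_or_eq.mp hj with h' | h'
        · exact lt_trans ((findG_none arr (arr.getD idx 0) idx).mp hE j h') hv
        · subst h'; exact hv
      rw [hNone]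
      simp only
      have hmin := dV_min arr idx hE
      have htop : dSum arr 0 (idx+1) = dSum arr 0 idx + dV arr idx := by
        unfold dSum
        rw [Finset.sum_Ico_succ_top (by omega)]
      rw [hdpi]
      omega
    | some p =>
      obtain ⟨hp1, hp2, hp3⟩ := (findG_some arr (arr.getD idx 0) idx p).mp hE
      have hpg : ge.getD idx idx = p := by rw [hok, hE]; rfl
      rw [hpg, if_neg (by omega)]
      have hsr : pvA_sumRange dp (p+1) idx = dSum arr (p+1) idx :=
        sumRange_congr dp arr (p+1) idx (fun j hj1 hj2 => hdp j (by omega))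
      have htop : dSum arr (p+1) (idx+1) = dSum arr (p+1) idx + dV arr idx := by
        unfold dSum
        rw [Finset.sum_Ico_succ_top (by omega)]
      by_cases hvp : arr.getD p 0 < v
      · have hskip : pvB_findG arr v (idx+1) = pvB_findG arr v (p+1) := by
          refine findG_skip arr v (p+1) (idx+1) (by omega) (fun j hj1 hj2 => ?_)
          rcases Nat.lt_succ_iff_lt_or_eq.mp hj2 with h' | h'
          · exact lt_trans (hp3 j (by omega) h') hv
          · subst h'; exact hv
        rw [ih p _ (by omega) (by omega) hvp, hskip]
        cases hG : pvB_findG arr v (p+1) with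
        | none =>
          simp only
          have hsplit : dSum arr 0 (idx+1) = dSum arr 0 (p+1) + dSum arr (p+1) (idx+1) := by
            unfold dSum
            rw [Finset.sum_Ico_consecutive _ (by omega) (by omega)]
          rw [hdpi, hsr]
          omega
        | some g =>
          obtain ⟨hg1, _, _⟩ := (findG_some arr v (p+1) g).mp hG
          simp only
          have hsplit : dSum arr (g+1) (idx+1) = dSum arr (g+1) (p+1) + dSum arr (p+1) (idx+1) := by
            unfold dSum
            rw [Finset.sum_Ico_consecutive _ (by omega) (by omega)]
          rw [hdpi, hsr]
          omega
      · have hSome : pvB_findG arr v (idx+1) = some p := by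
          refine (findG_some arr v (idx+1) p).mpr ⟨by omega, hvp, fun j hj1 hj2 => ?_⟩
          rcases Nat.lt_succ_iff_lt_or_eq.mp hj2 with h' | h'
          · exact lt_trans (hp3 j (by omega) h') hv
          · subst h'; exact hv
        rw [hSome]
        simp only
        cases fuel with
        | zero => omega
        | succ fuel' =>
          conv_lhs => rw [pvA_chaseSum]
          rw [if_neg hvp, hdpi, hsr]
          omega

def dpInv (arr : List Int) (n m : Nat) (dp : List Int) : Prop :=
  dp.length = n ∧ ∀ k, k < m → dp.getD k 0 = dV arr k

theorem step2_inv (arr : List Int) (n i : Nat) (ge le : List Nat) (dp : List Int)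
    (hn : n = arr.length) (hi1 : 1 ≤ i) (hin : i < n)
    (hge : ∀ k, k < n → ge.getD k k = (GEi arr k).getD k)
    (hle : ∀ k, k < n → le.getD k k = (LTi arr k).getD k)
    (hdp : dpInv arr n i dp) :
    dpInv arr n (i+1) (pvA_step2 arr ge le n dp i) := by
  obtain ⟨hlen, hvals⟩ := hdp
  have hge' : ∀ k, k < i → ge.getD k k = (GEi arr k).getD k := fun k hk => hge k (by omega)
  have hentry : pvA_chaseSum arr ge dp (arr.getD i 0) n (le.getD i i) 0 + 1 = dV arr i := by
    have hli := hle i hin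
    cases hE : LTi arr i with
    | none =>
      have hid : le.getD i i = i := by rw [hli, hE]; rfl
      rw [hid]
      obtain ⟨f, rfl⟩ : ∃ f, n = f + 1 := ⟨n - 1, by omega⟩
      have h0 : pvA_chaseSum arr ge dp (arr.getD i 0) (f+1) i 0 = 0 := by
        conv_lhs => rw [pvA_chaseSum]
        rw [if_neg (by omega)]
      rw [h0, dV_eq]
      unfold LTi at hE
      rw [hE]
      norm_num
    | some l =>
      obtain ⟨hl1, hl2, hl3⟩ := (findL_some arr (arr.getD i 0) i l).mp hE
      have hid : le.getD i i = l := by rw [hli, hE]; rfl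
      rw [hid]
      rw [chaseSum_spec arr ge dp (arr.getD i 0) i hge' hvals n l 0 (by omega) (by omega) (by omega)]
      have hstep : pvB_findG arr (arr.getD i 0) (l+1) = pvB_findG arr (arr.getD i 0) l := by
        rw [pvB_findG, if_pos (by omega)]
      obtain ⟨G, hGle, hGdef⟩ : ∃ G : Nat, G ≤ l + 1 ∧
          (match pvB_findG arr (arr.getD i 0) l with | none => 0 | some g => g+1) = G := by
        cases hG : pvB_findG arr (arr.getD i 0) l with
        | none => exact ⟨0, by omega, rfl⟩
        | some g =>
          have := ((findG_some arr (arr.getD i 0) l g).mp hG).1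
          exact ⟨g+1, by omega, rfl⟩
      rw [hstep, dV_eq]
      unfold LTi at hE
      rw [hE]
      simp only [hGdef]
      push_cast
      ring
  constructor
  · unfold pvA_step2
    simp [hlen]
  · intro k hk
    unfold pvA_step2
    rcases (by omega : k < i ∨ k = i) with h' | h'
    · rw [pv_getD_set_ne _ _ _ _ _ (by omega)]
      exact hvals k h'
    · rw [h', pv_getD_set_self _ _ _ _ (by omega)]
      exact hentry

theorem loop2_fold (arr : List Int) (n : Nat) (ge le : List Nat)
    (hn : n = arr.length)
    (hge : ∀ k, k < n → ge.getD k k = (GEi arr k).getD k)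
    (hle : ∀ k, k < n → le.getD k k = (LTi arr k).getD k) :
    ∀ t, t + 1 ≤ n →
      dpInv arr n (t+1)
        ((List.range' 1 t).foldl (pvA_step2 arr ge le n) ((List.replicate n (0:Int)).set 0 1)) := by
  intro t
  induction t with
  | zero =>
    intro h
    rw [show List.range' 1 0 = ([] : List Nat) from rfl, List.foldl_nil]
    constructor
    · simp
    · intro k hk
      have hk0 : k = 0 := by omega
      subst hk0
      rw [pv_getD_set_self _ _ _ _ (by simp; omega)]
      rw [dV_eq]
      rfl
  | succ t ih =>
    intro h
    rw [List.range'_concat, List.foldl_append, List.foldl_cons, List.foldl_nil,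
      show 1 + 1 * t = t + 1 from by omega]
    exact step2_inv arr n (t+1) ge le _ hn (by omega) (by omega) hge hle (ih (by omega))

-- B-side invariant
def bInv (arr : List Int) (n t : Nat) (st : List Int × List Int) : Prop :=
  st.1.length = n ∧ (∀ k, k < t+1 → st.1.getD k 0 = dV arr k) ∧
  st.2.length = t+2 ∧ (∀ k, k < t+2 → st.2.getD k 0 = dSum arr 0 k)

theorem stepB_inv (arr : List Int) (n t : Nat) (st : List Int × List Int)
    (hn : n = arr.length) (h : t + 1 < n) (hInv : bInv arr n t st) :
    bInv arr n (t+1) (pvB_step arr st (t+1)) := by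
  obtain ⟨hl1, hv1, hl2, hv2⟩ := hInv
  have hdi : (match pvB_findL arr (arr.getD (t+1) 0) (t+1) with
      | none => (1 : Int)
      | some l =>
        1 + st.2.getD (l+1) 0 -
          st.2.getD (match pvB_findG arr (arr.getD (t+1) 0) l with | none => 0 | some g => g+1) 0) = dV arr (t+1) := by
    cases hL : pvB_findL arr (arr.getD (t+1) 0) (t+1) with
    | none =>
      rw [dV_eq, hL]
    | some l =>
      obtain ⟨hl1', hl2', hl3'⟩ := (findL_some arr (arr.getD (t+1) 0) (t+1) l).mp hL
      obtain ⟨G, hGle, hGdef⟩ : ∃ G : Nat, G ≤ l + 1 ∧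
          (match pvB_findG arr (arr.getD (t+1) 0) l with | none => 0 | some g => g+1) = G := by
        cases hG : pvB_findG arr (arr.getD (t+1) 0) l with
        | none => exact ⟨0, by omega, rfl⟩
        | some g =>
          have := ((findG_some arr (arr.getD (t+1) 0) l g).mp hG).1
          exact ⟨g+1, by omega, rfl⟩
      rw [dV_eq, hL]
      simp only [hGdef]
      rw [hv2 (l+1) (by omega), hv2 G (by omega)]
      have hsplit : dSum arr 0 (l+1) = dSum arr 0 G + dSum arr G (l+1) := by
        unfold dSum
        rw [Finset.sum_Ico_consecutive _ (by omega) (by omega)]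
      push_cast
      linarith [hsplit]
  refine ⟨by show (st.1.set (t+1) _).length = n; simp [hl1],
    ?_, by show (st.2 ++ [_]).length = t+1+2; simp [hl2], ?_⟩
  · intro k hk
    show ((st.1.set (t+1) _).getD k 0) = dV arr k
    rcases (by omega : k < t+1 ∨ k = t+1) with h' | h'
    · rw [pv_getD_set_ne _ _ _ _ _ (by omega)]
      exact hv1 k h'
    · rw [h', pv_getD_set_self _ _ _ _ (by omega)]
      exact hdi
  · intro k hk
    show ((st.2 ++ [st.2.getD (st.2.length - 1) 0 + _]).getD k 0) = dSum arr 0 k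
    rcases (by omega : k < t+2 ∨ k = t+2) with h' | h'
    · rw [pv_getD_append_lt _ _ _ _ (by omega)]
      exact hv2 k h'
    · have hB : dSum arr 0 (t+1+1) = dSum arr 0 (t+1) + dV arr (t+1) := by
        unfold dSum
        rw [Finset.sum_Ico_succ_top (by omega : 0 ≤ t+1)]
      rw [h', show t + 2 = st.2.length from by omega, pv_getD_append_length,
        show st.2.length - 1 = t + 1 from by omega, hv2 (t+1) (by omega),
        show st.2.length = t + 1 + 1 from by omega, hB]
      exact congrArg (fun y => dSum arr 0 (t+1) + y) hdi

theorem loopB_fold (arr : List Int) (n : Nat) (hn : n = arr.length) :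
    ∀ t, t + 1 ≤ n →
      bInv arr n t
        ((List.range' 1 t).foldl (pvB_step arr) ((List.replicate n (0:Int)).set 0 1, [0, 1])) := by
  intro t
  induction t with
  | zero =>
    intro h
    rw [show List.range' 1 0 = ([] : List Nat) from rfl, List.foldl_nil]
    refine ⟨by simp, ?_, by simp, ?_⟩
    · intro k hk
      have hk0 : k = 0 := by omega
      subst hk0
      show ((List.replicate n (0:Int)).set 0 1).getD 0 0 = dV arr 0
      rw [pv_getD_set_self _ _ _ _ (by simp; omega), dV_eq]
      rfl
    · intro k hk
      interval_cases k
      · rfl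
      · show (1 : Int) = dSum arr 0 1
        have : dV arr 0 = 1 := by rw [dV_eq]; rfl
        unfold dSum
        rw [Finset.sum_Ico_succ_top (by omega)]
        simp [this]
  | succ t ih =>
    intro h
    rw [List.range'_concat, List.foldl_append, List.foldl_cons, List.foldl_nil,
      show 1 + 1 * t = t + 1 from by omega]
    exact stepB_inv arr n t _ hn (by omega) (ih (by omega))

-- ===== VERDICT (by name: the statement is the Claim_ definition above) =====
theorem pv_final (arr : List Int) (dp : List Int)
    (hlen : dp.length = arr.length)
    (hval : dp.getD (arr.length - 1) 0 = dV arr (arr.length - 1)) :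
    (PySem.List.pyGet? dp (-1)).getD 0 - 1 = dV arr (arr.length - 1) - 1 := by
  rw [PySem.List.pyGet?_neg_one, List.getLast?_eq_getElem?, ← List.getD_eq_getElem?_getD,
    hlen, hval]

theorem sol2_count_increase_arr_spec : Claim_equal_sol2_count_increase_arr := by
  unfold Claim_equal_sol2_count_increase_arr
  intro arr _ hpre
  unfold Spec_sol2_count_increase_arr
  have hn1 : 1 ≤ arr.length := by
    cases arr with
    | nil => exact absurd rfl hpre
    | cons a l => simp
  have hA := loop1_fold arr arr.length rfl (arr.length - 1) (by omega)
  rw [show arr.length - 1 + 1 = arr.length from by omega] at hA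
  obtain ⟨-, -, hok1, -⟩ := hA
  have hdpInv := loop2_fold arr arr.length _ _ rfl
    (fun k hk => (hok1 k hk).1) (fun k hk => (hok1 k hk).2) (arr.length - 1) (by omega)
  rw [show arr.length - 1 + 1 = arr.length from by omega] at hdpInv
  obtain ⟨hlenA, hvalsA⟩ := hdpInv
  have hB := loopB_fold arr arr.length rfl (arr.length - 1) (by omega)
  obtain ⟨hlenB, hvalsB, -, -⟩ := hB
  unfold sol2_count_increase_arr sol2_count_increase_arr_alt
  simp only
  rw [pv_final arr _ hlenA (hvalsA _ (by omega)),
    pv_final arr _ hlenB (hvalsB _ (by omega))]
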